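-- pv_equiv track=rewrite | github.com/Covax84/Snippets | insolation.py | insolation_hours
-- ===== SOURCE A (Python) =====
-- def insolation_hours(hours: list, flags: list) -> list:
--     """ result[0] contains values with negative flag
--         result[1] contains values with positive flag
--         Proper docstring is up to you :>
--     """
--     result = [[], []]
--     positive = []
--     negative = []
--
--     for value, flag in zip(hours, flags):
--         if flag:
--             positive.append(value)
--             if negative:
--                 result[0].append(negative)
--                 negative = []
--         elif not flag:
--             negative.append(value)
--             if positive:
--                 result[1].append(positive)
--                 positive = []
--
--     if positive:
--         result[1].append(positive)
--     elif negative: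
--         result[0].append(negative)
--
--     return result
-- ===== SOURCE B (Python) =====
-- def insolation_hours(hours: list, flags: list) -> list:
--     negative_groups = []
--     positive_groups = []
--     prev = None
--     for value, flag in reversed(list(zip(hours, flags))):
--         groups = positive_groups if flag else negative_groups
--         if prev is not None and bool(prev) == bool(flag):
--             groups[-1].append(value)
--         else:
--             groups.append([value])
--         prev = flag
--     return [[g[::-1] for g in reversed(negative_groups)],
--             [g[::-1] for g in reversed(positive_groups)]]
-- ===== Notes on version B (the rewrite author's own statement) =====
-- stated objective: alternative
-- what changed: Traverses the zipped sequence right-to-left, growing the current group at the end of its bucket when the flag matches the element to its right (opening a new group otherwise) and reversing groups and buckets at return; no pending-run buffers or flush-on-switch branches.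
import Mathlib
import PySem

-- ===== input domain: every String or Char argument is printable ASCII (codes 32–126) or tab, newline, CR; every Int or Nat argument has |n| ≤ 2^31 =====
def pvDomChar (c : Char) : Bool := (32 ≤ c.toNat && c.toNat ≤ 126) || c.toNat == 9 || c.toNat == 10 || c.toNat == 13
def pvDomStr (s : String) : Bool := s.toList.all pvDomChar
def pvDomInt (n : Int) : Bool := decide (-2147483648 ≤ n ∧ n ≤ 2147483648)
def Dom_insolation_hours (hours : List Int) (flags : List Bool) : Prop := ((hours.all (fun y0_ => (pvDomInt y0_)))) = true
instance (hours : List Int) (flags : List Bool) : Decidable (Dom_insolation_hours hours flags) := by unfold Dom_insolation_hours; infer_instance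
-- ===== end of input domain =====

-- B traverses the zipped sequence right-to-left, growing the current group at the end of its
-- bucket and reversing at return, replacing A's forward pass with pending buffers and
-- flush-on-switch branches (alternative decomposition; same cost).

-- ===== PORT A =====
-- state: (result[0], result[1], positive, negative)
def pvAStep (st : List (List Int) × List (List Int) × List Int × List Int)
    (vf : Int × Bool) : List (List Int) × List (List Int) × List Int × List Int :=
  let (r0, r1, pos, neg) := st
  let (value, flag) := vf
  if flag then
    let pos' := pos ++ [value]
    if neg ≠ [] then (r0 ++ [neg], r1, pos', []) else (r0, r1, pos', neg)
  else
    let neg' := neg ++ [value]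
    if pos ≠ [] then (r0, r1 ++ [pos], [], neg') else (r0, r1, pos, neg')

def pvAFin (st : List (List Int) × List (List Int) × List Int × List Int) :
    List (List (List Int)) :=
  let (r0, r1, pos, neg) := st
  if pos ≠ [] then [r0, r1 ++ [pos]]
  else if neg ≠ [] then [r0 ++ [neg], r1]
  else [r0, r1]

def insolation_hours (hours : List Int) (flags : List Bool) : List (List (List Int)) :=
  pvAFin ((hours.zip flags).foldl pvAStep ([], [], [], []))

-- ===== PORT B =====
-- reversed-iteration state: (negative_groups, positive_groups, prev)
-- groups[-1].append(value) is ported with dropLast/getLastD; on the inputs reached it is exact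
-- (the bucket is nonempty whenever prev matches the flag, so Python never raises there)
def pvBStep (st : List (List Int) × List (List Int) × Option Bool)
    (vf : Int × Bool) : List (List Int) × List (List Int) × Option Bool :=
  let (neg, pos, prev) := st
  let (value, flag) := vf
  if flag then
    if prev == some flag then (neg, pos.dropLast ++ [pos.getLastD [] ++ [value]], some flag)
    else (neg, pos ++ [[value]], some flag)
  else
    if prev == some flag then (neg.dropLast ++ [neg.getLastD [] ++ [value]], pos, some flag)
    else (neg ++ [[value]], pos, some flag)

def insolation_hours_alt (hours : List Int) (flags : List Bool) : List (List (List Int)) :=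
  let st := ((hours.zip flags).reverse).foldl pvBStep ([], [], none)
  [(st.1.reverse).map (fun g => (PySem.List.slice? g none none (-1)).getD []),
   ((st.2.1).reverse).map (fun g => (PySem.List.slice? g none none (-1)).getD [])]

-- ===== PRECONDITION & SPEC =====
def Spec_insolation_hours (hours : List Int) (flags : List Bool) (out : List (List (List Int))) : Prop := out = insolation_hours_alt hours flags
instance (hours : List Int) (flags : List Bool) (out : List (List (List Int))) : Decidable (Spec_insolation_hours hours flags out) := by unfold Spec_insolation_hours; infer_instance

-- ===== CLAIM (what is proved, stated in full; the proofs are below) =====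
def Claim_equal_insolation_hours : Prop := ∀ (hours : List Int) (flags : List Bool), Dom_insolation_hours hours flags → Spec_insolation_hours hours flags (insolation_hours hours flags)

-- ===== LEMMAS AND PROOFS =====

-- proof-side decomposition of the sequence into maximal runs of equal flag
def pvGroupBy : List (Int × Bool) → List (Bool × List Int)
  | [] => []
  | (v, f) :: rest =>
    (f, v :: (rest.takeWhile (fun p => p.2 == f)).map Prod.fst)
      :: pvGroupBy (rest.dropWhile (fun p => p.2 == f))
termination_by l => l.length
decreasing_by
  simpa using Nat.lt_succ_of_le (List.length_dropWhile_le _ _)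

def pvPart0 (gs : List (Bool × List Int)) : List (List Int) :=
  (gs.filter (fun g => !g.1)).map Prod.snd

def pvPart1 (gs : List (Bool × List Int)) : List (List Int) :=
  (gs.filter (fun g => g.1)).map Prod.snd

-- appender used to relate A's fold to the run decomposition
def pvCStep (r : List (List Int) × List (List Int)) (kg : Bool × List Int) :
    List (List Int) × List (List Int) :=
  if kg.1 then (r.1, r.2 ++ [kg.2]) else (r.1 ++ [kg.2], r.2)

-- processing a run of true-flagged items just accumulates into `positive`
lemma pvAbsorbTrue (run : List (Int × Bool)) (h : ∀ x ∈ run, x.2 = true) :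
    ∀ r0 r1 pos, run.foldl pvAStep (r0, r1, pos, []) =
      (r0, r1, pos ++ run.map Prod.fst, []) := by
  induction run with
  | nil => simp
  | cons x xs ih =>
    intro r0 r1 pos
    obtain ⟨v, f⟩ := x
    have hf : f = true := h (v, f) (List.mem_cons_self)
    subst hf
    have h1 : pvAStep (r0, r1, pos, []) (v, true) = (r0, r1, pos ++ [v], []) := by
      simp [pvAStep]
    rw [List.foldl_cons, h1, ih (fun y hy => h y (List.mem_cons_of_mem _ hy))]
    simp

-- processing a run of false-flagged items just accumulates into `negative`
lemma pvAbsorbFalse (run : List (Int × Bool)) (h : ∀ x ∈ run, x.2 = false) :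
    ∀ r0 r1 neg, run.foldl pvAStep (r0, r1, [], neg) =
      (r0, r1, [], neg ++ run.map Prod.fst) := by
  induction run with
  | nil => simp
  | cons x xs ih =>
    intro r0 r1 neg
    obtain ⟨v, f⟩ := x
    have hf : f = false := h (v, f) (List.mem_cons_self)
    subst hf
    have h1 : pvAStep (r0, r1, [], neg) (v, false) = (r0, r1, [], neg ++ [v]) := by
      simp [pvAStep]
    rw [List.foldl_cons, h1, ih (fun y hy => h y (List.mem_cons_of_mem _ hy))]
    simp

lemma pvDropHead {α : Type} (p : α → Bool) (l : List α) (x : α) (xs : List α)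
    (h : l.dropWhile p = x :: xs) : p x = false := by
  have hne : l.dropWhile p ≠ [] := by rw [h]; simp
  have hhd : (l.dropWhile p).head hne = x := by
    simp [h]
  have := List.head_dropWhile_not p hne
  rw [hhd] at this
  simpa using this

-- A's fold equals the run-appender fold over the run decomposition
lemma pvMain (ps : List (Int × Bool)) : ∀ r0 r1,
    pvAFin (ps.foldl pvAStep (r0, r1, [], [])) =
      [((pvGroupBy ps).foldl pvCStep (r0, r1)).1,
       ((pvGroupBy ps).foldl pvCStep (r0, r1)).2] := by
  induction ps using pvGroupBy.induct with
  | case1 => intro r0 r1; simp [pvAFin, pvGroupBy]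
  | case2 v f rest ih =>
    intro r0 r1
    have hrun : ∀ x ∈ rest.takeWhile (fun p => p.2 == f), x.2 = f := by
      intro x hx
      simpa using List.mem_takeWhile_imp hx
    have hsplit : rest = rest.takeWhile (fun p => p.2 == f)
        ++ rest.dropWhile (fun p => p.2 == f) := (List.takeWhile_append_dropWhile).symm
    cases f with
    | true =>
      have h1 : pvAStep (r0, r1, [], []) (v, true) = (r0, r1, [v], []) := by
        simp [pvAStep]
      rw [List.foldl_cons, h1]
      conv_lhs => rw [hsplit]
      rw [List.foldl_append, pvAbsorbTrue _ hrun]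
      simp only [List.singleton_append]
      rcases hd : rest.dropWhile (fun p => p.2 == true) with _ | ⟨⟨w, g⟩, rest''⟩
      · rw [hd, List.foldl_nil]
        conv_rhs => rw [pvGroupBy]
        rw [hd]
        simp [pvGroupBy, pvAFin, pvCStep]
      · have hg : g = false := by
          simpa using pvDropHead (fun p : Int × Bool => p.2 == true) rest (w, g) rest'' hd
        subst hg
        have h2 : pvAStep (r0, r1, v :: (rest.takeWhile (fun p => p.2 == true)).map Prod.fst, [])
            (w, false) = (r0, r1 ++ [v :: (rest.takeWhile (fun p => p.2 == true)).map Prod.fst], [], [w]) := by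
          simp [pvAStep]
        have h3 : pvAStep (r0, r1 ++ [v :: (rest.takeWhile (fun p => p.2 == true)).map Prod.fst], [], [])
            (w, false) = (r0, r1 ++ [v :: (rest.takeWhile (fun p => p.2 == true)).map Prod.fst], [], [w]) := by
          simp [pvAStep]
        rw [hd, List.foldl_cons, h2, ← h3, ← List.foldl_cons, ← hd, ih]
        conv_rhs => rw [pvGroupBy]
        simp only [List.foldl_cons]
        simp [pvCStep]
    | false =>
      have h1 : pvAStep (r0, r1, [], []) (v, false) = (r0, r1, [], [v]) := by
        simp [pvAStep]
      rw [List.foldl_cons, h1]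
      conv_lhs => rw [hsplit]
      rw [List.foldl_append, pvAbsorbFalse _ (by simpa using hrun)]
      simp only [List.singleton_append]
      rcases hd : rest.dropWhile (fun p => p.2 == false) with _ | ⟨⟨w, g⟩, rest''⟩
      · rw [hd, List.foldl_nil]
        conv_rhs => rw [pvGroupBy]
        rw [hd]
        simp [pvGroupBy, pvAFin, pvCStep]
      · have hg : g = true := by
          simpa using pvDropHead (fun p : Int × Bool => p.2 == false) rest (w, g) rest'' hd
        subst hg
        have h2 : pvAStep (r0, r1, [], v :: (rest.takeWhile (fun p => p.2 == false)).map Prod.fst)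
            (w, true) = (r0 ++ [v :: (rest.takeWhile (fun p => p.2 == false)).map Prod.fst], r1, [w], []) := by
          simp [pvAStep]
        have h3 : pvAStep (r0 ++ [v :: (rest.takeWhile (fun p => p.2 == false)).map Prod.fst], r1, [], [])
            (w, true) = (r0 ++ [v :: (rest.takeWhile (fun p => p.2 == false)).map Prod.fst], r1, [w], []) := by
          simp [pvAStep]
        rw [hd, List.foldl_cons, h2, ← h3, ← List.foldl_cons, ← hd, ih]
        conv_rhs => rw [pvGroupBy]
        simp only [List.foldl_cons]
        simp [pvCStep]

-- the appender fold computes the two bucket partitions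
lemma pvCFold (gs : List (Bool × List Int)) : ∀ r0 r1,
    gs.foldl pvCStep (r0, r1) = (r0 ++ pvPart0 gs, r1 ++ pvPart1 gs) := by
  induction gs with
  | nil => intro r0 r1; simp [pvPart0, pvPart1]
  | cons g gs ih =>
    intro r0 r1
    obtain ⟨k, vals⟩ := g
    cases k <;> simp [pvCStep, ih, pvPart0, pvPart1]

-- B's reversed fold computes the bucket partitions, each group and each bucket reversed,
-- and ends with prev = flag of the head
lemma pvBFold (ps : List (Int × Bool)) :
    ps.foldr (fun vf st => pvBStep st vf) ([], [], none) =
      (((pvPart0 (pvGroupBy ps)).map List.reverse).reverse,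
       ((pvPart1 (pvGroupBy ps)).map List.reverse).reverse, ps.head?.map Prod.snd) := by
  induction ps with
  | nil => simp [pvGroupBy, pvPart0, pvPart1]
  | cons x rest ih =>
    obtain ⟨v, f⟩ := x
    rw [List.foldr_cons, ih]
    rcases rest with _ | ⟨⟨w, g⟩, rest'⟩
    · cases f <;> simp [pvGroupBy, pvBStep, pvPart0, pvPart1]
    · by_cases hg : g = f
      · subst hg
        have hGB : pvGroupBy ((v, g) :: (w, g) :: rest') =
            (g, v :: w :: (rest'.takeWhile (fun p => p.2 == g)).map Prod.fst)
              :: pvGroupBy (rest'.dropWhile (fun p => p.2 == g)) := by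
          rw [pvGroupBy]
          simp
        have hGB2 : pvGroupBy ((w, g) :: rest') =
            (g, w :: (rest'.takeWhile (fun p => p.2 == g)).map Prod.fst)
              :: pvGroupBy (rest'.dropWhile (fun p => p.2 == g)) := by
          rw [pvGroupBy]
        rw [hGB, hGB2]
        cases g <;> simp [pvBStep, pvPart0, pvPart1]
      · have hGB : pvGroupBy ((v, f) :: (w, g) :: rest') =
            (f, [v]) :: pvGroupBy ((w, g) :: rest') := by
          rw [pvGroupBy]
          simp [hg]
        rw [hGB]
        cases f with
        | true =>
          have hg' : g = false := by cases g <;> simp_all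
          subst hg'
          simp [pvBStep, pvPart0, pvPart1]
        | false =>
          have hg' : g = true := by cases g <;> simp_all
          subst hg'
          simp [pvBStep, pvPart0, pvPart1]

-- ===== VERDICT (by name: the statement is the Claim_ definition above) =====
theorem insolation_hours_spec : Claim_equal_insolation_hours := by
  intro hours flags _
  unfold Spec_insolation_hours insolation_hours insolation_hours_alt
  rw [pvMain (hours.zip flags) [] [], pvCFold, List.foldl_reverse, pvBFold]
  simp [PySem.List.slice?_none_none_neg_one]
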